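-- pv_equiv track=rewrite | github.com/Fidget-Spinner/trace-analyzer | src/test/bad_input.py | foo
-- ===== SOURCE A (Python) =====
-- def foo(x, loops):
--     x = 0
--     for i in range(loops):
--         if i < 100000:
--             if x <= 1:
--                 x = 1
--             else:
--                 x = 4
--         else:
--             x = x + 2
--     return x
-- ===== SOURCE B (Python) =====
-- def foo(x, loops):
--     # closed form of the state machine: x is forced to 1 during the first
--     # 100000 iterations, then increases by 2 each remaining iteration
--     if loops <= 0:
--         return 0
--     if loops <= 100000:
--         return 1
--     return 1 + 2 * (loops - 100000)
-- ===== Notes on version B (the rewrite author's own statement) =====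
-- stated objective: faster
-- what changed: Replaced the O(loops) simulation loop by a closed-form case analysis (0 / 1 / 1+2*(loops-100000)).
import Mathlib
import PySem

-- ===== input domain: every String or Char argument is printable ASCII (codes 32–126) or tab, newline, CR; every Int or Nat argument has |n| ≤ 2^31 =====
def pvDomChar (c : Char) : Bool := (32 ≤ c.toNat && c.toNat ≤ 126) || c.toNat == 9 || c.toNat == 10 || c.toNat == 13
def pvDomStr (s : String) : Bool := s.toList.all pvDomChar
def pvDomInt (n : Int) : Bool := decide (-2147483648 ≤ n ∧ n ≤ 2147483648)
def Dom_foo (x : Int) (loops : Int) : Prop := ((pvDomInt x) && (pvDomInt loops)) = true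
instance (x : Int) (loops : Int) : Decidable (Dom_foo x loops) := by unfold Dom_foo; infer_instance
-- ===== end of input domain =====

-- B replaces A's O(loops) simulation loop by a closed-form O(1) case analysis.


-- ===== PORT A =====
-- literal transliteration: x := 0, then fold the loop body over range(loops)
def foo (x : Int) (loops : Int) : Int :=
  (PySem.List.pyRange 0 loops 1).foldl
    (fun x i => if i < 100000 then (if x ≤ 1 then 1 else 4) else x + 2) 0

-- ===== PORT B =====
def foo_alt (x : Int) (loops : Int) : Int :=
  if loops ≤ 0 then 0
  else if loops ≤ 100000 then 1
  else 1 + 2 * (loops - 100000)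

-- ===== PRECONDITION & SPEC =====
def Spec_foo (x : Int) (loops : Int) (out : Int) : Prop := out = foo_alt x loops
instance (x : Int) (loops : Int) (out : Int) : Decidable (Spec_foo x loops out) := by unfold Spec_foo; infer_instance

-- ===== CLAIM (what is proved, stated in full; the proofs are below) =====
def Claim_equal_foo : Prop := ∀ (x : Int) (loops : Int), Dom_foo x loops → Spec_foo x loops (foo x loops)

-- ===== LEMMAS AND PROOFS =====

-- closed form of the loop, with the threshold generalised to an arbitrary
-- positive constant C (keeps the big numeral out of the induction)
theorem foo_loop_closedC (C : Int) (hC : 0 < C) (n : Nat) :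
    (List.range n).foldl
      (fun (x : Int) (k : Nat) => if (k : Int) < C then (if x ≤ 1 then 1 else 4) else x + 2) (0 : Int)
    = (if (n : Int) ≤ 0 then 0 else if (n : Int) ≤ C then 1 else 1 + 2 * ((n : Int) - C)) := by
  induction n with
  | zero => simp
  | succ n ih =>
    rw [List.range_succ]
    simp only [List.foldl_append, List.foldl_cons, List.foldl_nil, ih]
    have hn : (0 : Int) ≤ (n : Int) := Int.natCast_nonneg n
    push_cast
    split_ifs <;> omega

-- ===== VERDICT (by name: the statement is the Claim_ definition above) =====
theorem foo_spec : Claim_equal_foo := by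
  intro x loops _
  unfold Spec_foo foo foo_alt
  rw [PySem.List.pyRange_one]
  simp only [List.foldl_map, zero_add, Int.sub_zero]
  rw [foo_loop_closedC 100000 (by omega) loops.toNat]
  by_cases h : loops ≤ 0
  · have : loops.toNat = 0 := by omega
    simp [this, h]
  · have : ((loops.toNat : Nat) : Int) = loops := by omega
    rw [this]
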